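-- pv_equiv track=rewrite | github.com/xtofuub/openrecon-ios | skills/conducting-social-engineering-penetration-test/scripts/process.py | analyze_by_department
-- ===== SOURCE A (Python) =====
-- def analyze_by_department(results: list[dict]) -> dict[str, dict]:
--     """Break down results by department/position."""
--     departments = {}
--     for entry in results:
--         dept = entry.get("position", "Unknown")
--         if dept not in departments:
--             departments[dept] = {
--                 "total": 0, "clicked": 0, "submitted": 0, "reported": 0
--             }
--         departments[dept]["total"] += 1
--         status = entry.get("status", "")
--         if status in ("Clicked Link", "Submitted Data"):
--             departments[dept]["clicked"] += 1
--         if status == "Submitted Data":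
--             departments[dept]["submitted"] += 1
--         if status == "Email Reported":
--             departments[dept]["reported"] += 1
--
--     return departments
-- ===== SOURCE B (Python) =====
-- def analyze_by_department(results: list[dict]) -> dict[str, dict]:
--     """Break down results by department/position (tabulate statuses, then summarize)."""
--     counts = {}
--     for entry in results:
--         dept = entry.get("position", "Unknown")
--         status = entry.get("status", "")
--         sc = counts.setdefault(dept, {})
--         sc[status] = sc.get(status, 0) + 1
--     return {
--         dept: {
--             "total": sum(sc.values()),
--             "clicked": sc.get("Clicked Link", 0) + sc.get("Submitted Data", 0),
--             "submitted": sc.get("Submitted Data", 0),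
--             "reported": sc.get("Email Reported", 0),
--         }
--         for dept, sc in counts.items()
--     }
-- ===== Notes on version B (the rewrite author's own statement) =====
-- stated objective: alternative
-- what changed: B first tabulates a nested dict of per-department status counts in one pass (no per-entry branch tests or four-counter records), then derives total/clicked/submitted/reported for each department from those status counts in a final comprehension.
import Mathlib
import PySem

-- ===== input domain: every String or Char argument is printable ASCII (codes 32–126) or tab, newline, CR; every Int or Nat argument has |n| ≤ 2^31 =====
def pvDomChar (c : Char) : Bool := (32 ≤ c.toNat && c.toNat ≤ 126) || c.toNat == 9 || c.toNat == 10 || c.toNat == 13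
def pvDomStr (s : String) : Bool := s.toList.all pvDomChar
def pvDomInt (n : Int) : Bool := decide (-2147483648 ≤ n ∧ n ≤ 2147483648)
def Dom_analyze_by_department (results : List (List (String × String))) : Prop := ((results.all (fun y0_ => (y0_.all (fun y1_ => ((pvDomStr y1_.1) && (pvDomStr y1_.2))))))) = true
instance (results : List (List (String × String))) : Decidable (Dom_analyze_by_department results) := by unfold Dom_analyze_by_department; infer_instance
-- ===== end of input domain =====

-- B tabulates per-(department,status) counts in one pass and derives the four metrics afterwards; alternative decomposition, same cost.


-- ===== PORT A =====
-- loop body of A: update the per-department four-counter record for one entry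
def pvAStep (departments : PySem.Dict String (PySem.Dict String Int))
    (entry : List (String × String)) : PySem.Dict String (PySem.Dict String Int) :=
  let dept := (PySem.Dict.mk entry).getD "position" "Unknown"
  let departments :=
    if departments.contains dept then departments
    else departments.insert dept
      (PySem.Dict.mk [("total", (0 : Int)), ("clicked", 0), ("submitted", 0), ("reported", 0)])
  let departments := departments.modify dept PySem.Dict.empty (fun d => d.modify "total" 0 (· + 1))
  let status := (PySem.Dict.mk entry).getD "status" ""
  let departments :=
    if status = "Clicked Link" ∨ status = "Submitted Data" then
      departments.modify dept PySem.Dict.empty (fun d => d.modify "clicked" 0 (· + 1))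
    else departments
  let departments :=
    if status = "Submitted Data" then
      departments.modify dept PySem.Dict.empty (fun d => d.modify "submitted" 0 (· + 1))
    else departments
  if status = "Email Reported" then
    departments.modify dept PySem.Dict.empty (fun d => d.modify "reported" 0 (· + 1))
  else departments

def analyze_by_department (results : List (List (String × String))) : List (String × List (String × Int)) :=
  (results.foldl pvAStep (PySem.Dict.empty : PySem.Dict String (PySem.Dict String Int))).items.map
    (fun p => (p.1, p.2.items))

-- ===== PORT B =====
-- loop body of B: bump the (department, status) tabulation for one entry
def pvBStep (counts : PySem.Dict String (PySem.Dict String Int))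
    (entry : List (String × String)) : PySem.Dict String (PySem.Dict String Int) :=
  let dept := (PySem.Dict.mk entry).getD "position" "Unknown"
  let status := (PySem.Dict.mk entry).getD "status" ""
  counts.modify dept PySem.Dict.empty (fun sc => sc.modify status 0 (· + 1))

-- summarize one department's status counts into the four metrics
def pvTally (sc : PySem.Dict String Int) : List (String × Int) :=
  [("total", sc.values.sum),
   ("clicked", sc.getD "Clicked Link" 0 + sc.getD "Submitted Data" 0),
   ("submitted", sc.getD "Submitted Data" 0),
   ("reported", sc.getD "Email Reported" 0)]

def analyze_by_department_alt (results : List (List (String × String))) : List (String × List (String × Int)) :=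
  let counts := results.foldl pvBStep (PySem.Dict.empty : PySem.Dict String (PySem.Dict String Int))
  counts.items.map (fun p => (p.1, pvTally p.2))

-- ===== PRECONDITION & SPEC =====
def Spec_analyze_by_department (results : List (List (String × String))) (out : List (String × List (String × Int))) : Prop := out = analyze_by_department_alt results
instance (results : List (List (String × String))) (out : List (String × List (String × Int))) : Decidable (Spec_analyze_by_department results out) := by unfold Spec_analyze_by_department; infer_instance

-- ===== CLAIM (what is proved, stated in full; the proofs are below) =====
def Claim_equal_analyze_by_department : Prop := ∀ (results : List (List (String × String))), Dom_analyze_by_department results → Spec_analyze_by_department results (analyze_by_department results)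

-- ===== LEMMAS AND PROOFS =====

-- render B's tabulation as A's dict-of-four-counter-records
def pvMkT (sc : PySem.Dict String Int) : PySem.Dict String Int := PySem.Dict.mk (pvTally sc)

def pvRender (d : PySem.Dict String (PySem.Dict String Int)) : PySem.Dict String (PySem.Dict String Int) :=
  PySem.Dict.mk (d.items.map (fun p => (p.1, pvMkT p.2)))

-- the effect of A's four conditional bumps on one department record
def pvF (status : String) (x : PySem.Dict String Int) : PySem.Dict String Int :=
  let x := x.modify "total" 0 (· + 1)
  let x := if status = "Clicked Link" ∨ status = "Submitted Data" then x.modify "clicked" 0 (· + 1) else x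
  let x := if status = "Submitted Data" then x.modify "submitted" 0 (· + 1) else x
  if status = "Email Reported" then x.modify "reported" 0 (· + 1) else x

theorem pvContains_render (d : PySem.Dict String (PySem.Dict String Int)) (k : String) :
    (pvRender d).contains k = d.contains k := by
  simp [pvRender, PySem.Dict.contains]
  rfl

theorem pvGet?_render (d : PySem.Dict String (PySem.Dict String Int)) (k : String) :
    (pvRender d).get? k = (d.get? k).map pvMkT := by
  simp [pvRender, PySem.Dict.get?]
  induction d.items with
  | nil => simp
  | cons p rest ih =>
      by_cases h : p.1 == k <;> simp [List.find?, h, ih]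

theorem pvInsert_render (d : PySem.Dict String (PySem.Dict String Int)) (k : String)
    (v : PySem.Dict String Int) :
    (pvRender d).insert k (pvMkT v) = pvRender (d.insert k v) := by
  simp only [PySem.Dict.insert, pvContains_render]
  by_cases h : d.contains k
  · simp [h, pvRender, List.map_map]
    intro a b _
    by_cases hd : a = k <;> simp [hd]
  · simp [h, pvRender]

-- A's loop body, rephrased: ensure the record exists, then apply the four bumps in place
theorem pvAStep_eq (D : PySem.Dict String (PySem.Dict String Int)) (entry : List (String × String)) :
    pvAStep D entry =
      (let dept := (PySem.Dict.mk entry).getD "position" "Unknown"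
       let status := (PySem.Dict.mk entry).getD "status" ""
       let D1 := if D.contains dept then D else D.insert dept (pvMkT PySem.Dict.empty)
       D1.insert dept (pvF status (D1.getD dept PySem.Dict.empty))) := by
  have hlit : PySem.Dict.mk [("total", (0 : Int)), ("clicked", 0), ("submitted", 0), ("reported", 0)]
      = pvMkT PySem.Dict.empty := rfl
  unfold pvAStep pvF
  rw [hlit]
  by_cases h1 : (PySem.Dict.mk entry).getD "status" "" = "Clicked Link" ∨
      (PySem.Dict.mk entry).getD "status" "" = "Submitted Data" <;>
    by_cases h2 : (PySem.Dict.mk entry).getD "status" "" = "Submitted Data" <;>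
    by_cases h3 : (PySem.Dict.mk entry).getD "status" "" = "Email Reported" <;>
    first
    | (rcases h1 with hx | hx <;>
       simp [hx, PySem.Dict.modify, PySem.Dict.getD_insert_self,
         PySem.Dict.insert_insert_self])
    | (have h1a := not_or.mp h1
       simp [h1a.1, h1a.2, h3, PySem.Dict.modify, PySem.Dict.getD_insert_self,
         PySem.Dict.insert_insert_self])

-- the values-sum of a status tabulation goes up by exactly one on each bump
theorem pvSum_modify_list (l : List (String × Int)) (k : String)
    (h : (l.map (fun p => p.1)).Nodup) :
    ((PySem.Dict.mk l).modify k 0 (· + 1)).values.sum = (l.map (fun p => p.2)).sum + 1 := by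
  induction l with
  | nil => simp [PySem.Dict.modify, PySem.Dict.insert, PySem.Dict.contains, PySem.Dict.getD,
      PySem.Dict.get?, PySem.Dict.values]
  | cons p rest ih =>
      simp only [List.map_cons, List.nodup_cons] at h
      by_cases hp : p.1 = k
      · subst hp
        have hrest : ∀ q ∈ rest, ¬ q.1 = p.1 := by
          intro q hq e
          exact h.1 (e ▸ List.mem_map_of_mem hq)
        simp [PySem.Dict.modify, PySem.Dict.insert, PySem.Dict.contains, PySem.Dict.getD,
          PySem.Dict.get?, PySem.Dict.values, List.find?]
        rw [List.map_congr_left (g := fun x : String × Int => x.2)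
          (by intro q hq; simp [hrest q hq])]
        ring_nf
      · have ih' := ih (by simpa using h.2)
        have hp' : (p.1 == k) = false := by simp [hp]
        simp only [PySem.Dict.modify, PySem.Dict.insert, PySem.Dict.contains, PySem.Dict.getD,
          PySem.Dict.get?, PySem.Dict.values, List.any_cons, List.find?, hp'] at ih' ⊢
        by_cases hc : rest.any (fun q => q.1 == k)
        · simp [hc, hp] at ih' ⊢
          omega
        · simp [hc, hp] at ih' ⊢
          omega

theorem pvSum_modify (sc : PySem.Dict String Int) (k : String) (h : sc.keys.Nodup) :
    ((sc.modify k 0 (· + 1)).values).sum = sc.values.sum + 1 := by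
  obtain ⟨l⟩ := sc
  exact pvSum_modify_list l k h

-- KEY: A's four conditional bumps on the rendered record equal rendering B's single bump
set_option maxRecDepth 8192 in
theorem pvKey (sc : PySem.Dict String Int) (status : String) (h : sc.keys.Nodup) :
    pvF status (pvMkT sc) = pvMkT (sc.modify status 0 (· + 1)) := by
  have htot := pvSum_modify sc status h
  have hCL := PySem.Dict.getD_modify sc status "Clicked Link" 0 (· + 1)
  have hSD := PySem.Dict.getD_modify sc status "Submitted Data" 0 (· + 1)
  have hER := PySem.Dict.getD_modify sc status "Email Reported" 0 (· + 1)
  unfold pvF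
  by_cases h1 : status = "Clicked Link"
  · subst h1
    apply PySem.Dict.ext
    simp only [pvMkT, pvTally, htot, hCL, hSD, hER]
    simp [PySem.Dict.modify, PySem.Dict.insert, PySem.Dict.contains, PySem.Dict.getD,
      PySem.Dict.get?, List.find?]
    try and_intros <;> omega
  · by_cases h2 : status = "Submitted Data"
    · subst h2
      apply PySem.Dict.ext
      simp only [pvMkT, pvTally, htot, hCL, hSD, hER]
      simp [h1, PySem.Dict.modify, PySem.Dict.insert, PySem.Dict.contains, PySem.Dict.getD,
        PySem.Dict.get?, List.find?]
      try and_intros <;> omega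
    · by_cases h3 : status = "Email Reported"
      · subst h3
        apply PySem.Dict.ext
        simp only [pvMkT, pvTally, htot, hCL, hSD, hER]
        simp [h1, h2, PySem.Dict.modify, PySem.Dict.insert, PySem.Dict.contains,
          PySem.Dict.getD, PySem.Dict.get?, List.find?]
        try and_intros <;> omega
      · have h1' : ¬("Clicked Link" = status) := fun e => h1 e.symm
        have h2' : ¬("Submitted Data" = status) := fun e => h2 e.symm
        have h3' : ¬("Email Reported" = status) := fun e => h3 e.symm
        rw [if_neg h1'] at hCL
        rw [if_neg h2'] at hSD
        rw [if_neg h3'] at hER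
        apply PySem.Dict.ext
        simp only [pvMkT, pvTally, htot, hCL, hSD, hER]
        simp [h1, h2, h3, PySem.Dict.modify, PySem.Dict.insert, PySem.Dict.contains,
          PySem.Dict.getD, PySem.Dict.get?, List.find?]
        try and_intros <;> omega

-- one loop step commutes with rendering
theorem pvStep_render (d : PySem.Dict String (PySem.Dict String Int))
    (entry : List (String × String))
    (h : ∀ p ∈ d.items, (p.2 : PySem.Dict String Int).keys.Nodup) :
    pvAStep (pvRender d) entry = pvRender (pvBStep d entry) := by
  rw [pvAStep_eq]
  simp only [pvContains_render]
  set dept := (PySem.Dict.mk entry).getD "position" "Unknown" with hdept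
  set status := (PySem.Dict.mk entry).getD "status" "" with hstatus
  have hscn : (d.getD dept PySem.Dict.empty).keys.Nodup := by
    rw [PySem.Dict.getD_eq_get?_getD]
    cases hg : d.get? dept with
    | none => simp [PySem.Dict.empty, PySem.Dict.keys]
    | some v => simpa using h (dept, v) (PySem.Dict.mem_items_of_get?_eq_some d hg)
  have key := pvKey (d.getD dept PySem.Dict.empty) status hscn
  have hB : pvBStep d entry = d.insert dept ((d.getD dept PySem.Dict.empty).modify status 0 (· + 1)) := rfl
  by_cases hc : d.contains dept = true
  · have hv : ∃ v, d.get? dept = some v := by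
      cases hg : d.get? dept with
      | none => exact absurd ((PySem.Dict.get?_eq_none_iff_contains d dept).mp hg) (by simp [hc])
      | some v => exact ⟨v, rfl⟩
    obtain ⟨v, hv⟩ := hv
    have hgr : (pvRender d).getD dept PySem.Dict.empty = pvMkT (d.getD dept PySem.Dict.empty) := by
      rw [PySem.Dict.getD_eq_get?_getD, pvGet?_render, hv,
        PySem.Dict.getD_of_get?_eq_some d PySem.Dict.empty hv]
      rfl
    simp only [hc, if_true, hgr, key, hB, pvInsert_render]
  · have hc' : d.contains dept = false := by simpa using hc
    have hge : d.getD dept PySem.Dict.empty = PySem.Dict.empty :=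
      PySem.Dict.getD_of_not_contains d PySem.Dict.empty hc'
    simp only [hc', Bool.false_eq_true, if_false, PySem.Dict.getD_insert_self,
      PySem.Dict.insert_insert_self]
    rw [hge] at key
    rw [key, pvInsert_render, hB, hge]

-- the invariants are preserved by one B step
theorem pvInv_step (d : PySem.Dict String (PySem.Dict String Int))
    (entry : List (String × String))
    (h : ∀ p ∈ d.items, (p.2 : PySem.Dict String Int).keys.Nodup) :
    ∀ p ∈ (pvBStep d entry).items, (p.2 : PySem.Dict String Int).keys.Nodup := by
  intro p hp
  simp only [pvBStep, PySem.Dict.modify] at hp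
  rcases (PySem.Dict.mem_items_insert _ _ _ _).mp hp with rfl | ⟨hmem, _⟩
  · simp only [PySem.Dict.modify]
    apply PySem.Dict.nodup_keys_insert
    rw [PySem.Dict.getD_eq_get?_getD]
    cases hg : d.get? ((PySem.Dict.mk entry).getD "position" "Unknown") with
    | none => simp [PySem.Dict.empty, PySem.Dict.keys]
    | some v => simpa using h (_, v) (PySem.Dict.mem_items_of_get?_eq_some d hg)
  · exact h _ hmem

theorem pvFold (results : List (List (String × String)))
    (d : PySem.Dict String (PySem.Dict String Int))
    (h : ∀ p ∈ d.items, (p.2 : PySem.Dict String Int).keys.Nodup) :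
    results.foldl pvAStep (pvRender d) = pvRender (results.foldl pvBStep d) := by
  induction results generalizing d with
  | nil => rfl
  | cons e rest ih =>
      simp only [List.foldl_cons, pvStep_render d e h]
      exact ih _ (pvInv_step d e h)

-- ===== VERDICT (by name: the statement is the Claim_ definition above) =====
theorem analyze_by_department_spec : Claim_equal_analyze_by_department := by
  intro results _
  unfold Spec_analyze_by_department analyze_by_department analyze_by_department_alt
  have hfold := pvFold results PySem.Dict.empty (by simp [PySem.Dict.empty])
  have hre : pvRender PySem.Dict.empty = PySem.Dict.empty := rfl
  rw [hre] at hfold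
  rw [hfold]
  simp [pvRender, List.map_map, Function.comp, pvMkT]
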